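/- GENERATED by mk_final_copies.py from the proof of the farm's unit `vorbis_decode_packet_rest.2b` (farm:vorbis_decode_packet_rest.2b.1: Proof.lean) as the
   re-elaboration sweep compiled it — do not edit. -/
import Asan.CheckWalk
import Vorbis.Spec.PacketRestFrame
import Vorbis.Spec.Reader
import Vorbis.Spec.Units.vorbis_decode_packet_rest_2b
import Vorbis.Spec.Worked.vorbis_decode_packet_rest_2b_Lemmas

/-
  UNIT vorbis_decode_packet_rest.2b — segment .2b of `vorbis_decode_packet_rest` (0x111393–0x1113fe; stb_vorbis_fixed.c 3233–3240):
  `if (get_bits(f, 1))`, `range = range_list[g->floor1_multiplier - 1]`, `finalY = f->finalY[i]`, `get_bits(f, ilog(range) - 1)`.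
  From `At2b` (cut17, 0x111393) to `At7a` (cut14, 0x1112b5: the bit was 0) or `At2c` (cut19, 0x111403: the return of get_bits).
  The work is in Lemmas.lean: `seg2b_first` (cut17 → `At7a` ∨ the intermediate assertion `seg2b_AtIlog` at the return of ilog,
  0x1113f8) and `seg2b_second` (`seg2b_AtIlog` → `At2c`); here they are chained by `ReachVia.trans`.
-/

open X86 X86.User Asan Vorbis Vorbis.Spec Vorbis.Spec.vorbis_decode_packet_rest

namespace Vorbis.Spec.vorbis_decode_packet_rest_2b

/-- **Segment .2b from its two parts**: `seg2b_first` leaves to `At7a` or reaches `seg2b_AtIlog`; `seg2b_second` takes that to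
`At2c`. The callees' contracts are instantiated with the function's own protected frame in front (`framesIn frames e`) and the
run's block predicate. -/
theorem seg2b_chain {Lay : Layout} (hLay : Lay.hi = 0x1000000) {μ : Microarch} (hμ : UserX.MicroOK μ) {u₀ : State}
    (hcode : HasCodeNat Lay u₀ Vorbis.L.vorbis_decode_packet_rest.entry Vorbis.Code.code_vorbis_decode_packet_rest.nat
      Vorbis.L.vorbis_decode_packet_rest.size)
    (hload4 : Asan.SmallCheck Lay μ Vorbis.WayInv (Vorbis.CodeOK u₀) [.rax, .rcx, .rdx] 4 Vorbis.L.__asan_load4_noabort.entry)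
    (hload8 : Asan.SmallCheck Lay μ Vorbis.WayInv (Vorbis.CodeOK u₀) [.rax, .rcx, .rdx] 8 Vorbis.L.__asan_load8_noabort.entry)
    (hload1 : Asan.SmallCheck Lay μ Vorbis.WayInv (Vorbis.CodeOK u₀) [.rax, .rdx] 1 Vorbis.L.__asan_load1_noabort.entry)
    (h_get_bits : ∀ (others : List Obj) (frames : List (Nat × FrameLayout)) (Blk : Block → Prop) (len : Nat),
      Calls Lay μ Vorbis.WayInv (Vorbis.conv u₀) Vorbis.L.get_bits.entry (Vorbis.Spec.get_bits.spec others frames Blk len))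
    (h_ilog : ∀ (others : List Obj) (frames : List (Nat × FrameLayout)),
      Calls Lay μ Vorbis.WayInv (Vorbis.conv u₀) Vorbis.L.ilog.entry (Vorbis.Spec.ilog.spec others frames)) :
    Vorbis.Spec.vorbis_decode_packet_rest.Seg2b Lay μ u₀ := by
  intro others frames len Ar stored room mode ysz e ret i v hat
  have hilog := h_ilog others (framesIn frames e)
  have hgb := h_get_bits others (framesIn frames e) (RunBlk Ar len) len
  -- 0x111393 … the return of ilog at 0x1113f8
  refine (seg2b_first hLay hμ hcode hload4 hload8 hload1 hilog hat).trans ?_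
  intro s hs
  rcases hs with h7 | hmid
  · -- the bit was 0: `At7a`
    exact ReachVia.done (Or.inl h7)
  · -- 0x1113f8 … the return of get_bits at 0x111403: `At2c`
    refine (seg2b_second hLay hμ hcode hgb hmid).trans ?_
    intro t ht
    exact ReachVia.done (Or.inr ht)

end Vorbis.Spec.vorbis_decode_packet_rest_2b

/-- Segment .2b of `vorbis_decode_packet_rest` (0x111393–0x1113fe) takes its entry assertion `At2b` to `At7a` or `At2c`. -/
theorem Vorbis.Spec.Worked.vorbis_decode_packet_rest_2b_ok : Vorbis.Spec.vorbis_decode_packet_rest_2b.Statement := by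
  unfold Vorbis.Spec.vorbis_decode_packet_rest_2b.Statement
  intro Lay hLay μ hμ u₀ hcode hload4 hload8 hload1 h_get_bits h_ilog
  exact Vorbis.Spec.vorbis_decode_packet_rest_2b.seg2b_chain hLay hμ hcode hload4 hload8 hload1 h_get_bits h_ilog
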